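-- pv_equiv track=rewrite | github.com/um-computacion-tm/scrabble-2023-DiegoXuHuang | game/util.py | split_groups_in_string
-- ===== SOURCE A (Python) =====
-- def split_groups_in_string(input_string):
--     word = []
--     i = 0
--     while i < len(input_string):
--         if i < len(input_string) - 1 and (input_string[i] == 'c' and input_string[i + 1] == 'h' or input_string[i] == 'l' and input_string[i + 1] == 'l' or input_string[i] == 'r' and input_string[i + 1] == 'r'):
--             word.append(input_string[i:i+2])
--             i += 2
--         else:
--             word.append(input_string[i])
--             i += 1
--     return word
-- ===== SOURCE B (Python) =====
-- import re
--
-- def split_groups_in_string(input_string):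
--     return re.findall(r'ch|ll|rr|[\s\S]', input_string)
-- ===== Notes on version B (the rewrite author's own statement) =====
-- stated objective: idiomatic
-- what changed: Replaced the manual index/while loop with a single regex scan re.findall(r'ch|ll|rr|[\s\S]', s), which greedily consumes a digraph when present and one character otherwise.
import Mathlib
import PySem

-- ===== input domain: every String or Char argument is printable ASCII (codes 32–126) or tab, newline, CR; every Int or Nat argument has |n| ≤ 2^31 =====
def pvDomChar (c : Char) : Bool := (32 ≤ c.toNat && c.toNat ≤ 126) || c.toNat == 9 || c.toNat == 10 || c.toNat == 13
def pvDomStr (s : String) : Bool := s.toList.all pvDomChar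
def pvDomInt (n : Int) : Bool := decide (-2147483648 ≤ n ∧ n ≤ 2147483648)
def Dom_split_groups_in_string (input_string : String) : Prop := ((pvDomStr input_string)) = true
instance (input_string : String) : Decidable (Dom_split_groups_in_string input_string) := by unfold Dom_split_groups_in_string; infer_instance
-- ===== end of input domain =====

-- B replaces A's manual index/while loop with a single greedy left-to-right
-- scan: re.findall(r'ch|ll|rr|[\s\S]', s) in Python, ported here by hand as
-- structural recursion on the character list (exact semantics of that regex).

-- ===== PORT A =====
-- A's while loop over index i; i only ever increases from 0, so it is a Nat.
-- 'len(input_string) - 1' is Nat truncated subtraction here: for the empty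
-- string the guard i < len is already false, so the difference is unreachable.
def split_groups_in_string_go (s : List Char) (i : Nat) : List String :=
  if _h : i < s.length then
    if i < s.length - 1 ∧
        ((s.getD i ' ' = 'c' ∧ s.getD (i+1) ' ' = 'h') ∨
         (s.getD i ' ' = 'l' ∧ s.getD (i+1) ' ' = 'l') ∨
         (s.getD i ' ' = 'r' ∧ s.getD (i+1) ' ' = 'r')) then
      -- input_string[i:i+2]
      String.ofList ((s.drop i).take 2) :: split_groups_in_string_go s (i + 2)
    else
      String.ofList [s.getD i ' '] :: split_groups_in_string_go s (i + 1)
  else []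
termination_by s.length - i

def split_groups_in_string (input_string : String) : List String :=
  split_groups_in_string_go input_string.toList 0

-- ===== PORT B =====
-- hand port of re.findall(r'ch|ll|rr|[\s\S]', s): at each position the engine
-- matches a digraph when present, else exactly one character (exact on all inputs)
def split_groups_in_string_alt_go : List Char → List String
  | 'c' :: 'h' :: rest => "ch" :: split_groups_in_string_alt_go rest
  | 'l' :: 'l' :: rest => "ll" :: split_groups_in_string_alt_go rest
  | 'r' :: 'r' :: rest => "rr" :: split_groups_in_string_alt_go rest
  | c :: rest => String.ofList [c] :: split_groups_in_string_alt_go rest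
  | [] => []

def split_groups_in_string_alt (input_string : String) : List String :=
  split_groups_in_string_alt_go input_string.toList

-- ===== PRECONDITION & SPEC =====
def Spec_split_groups_in_string (input_string : String) (out : List String) : Prop := out = split_groups_in_string_alt input_string
instance (input_string : String) (out : List String) : Decidable (Spec_split_groups_in_string input_string out) := by unfold Spec_split_groups_in_string; infer_instance

-- ===== CLAIM (what is proved, stated in full; the proofs are below) =====
def Claim_equal_split_groups_in_string : Prop := ∀ (input_string : String), Dom_split_groups_in_string input_string → Spec_split_groups_in_string input_string (split_groups_in_string input_string)

-- ===== LEMMAS AND PROOFS =====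

-- B's scan on a cons whose head starts no digraph just emits the head.
theorem alt_go_cons (a : Char) (t : List Char)
    (hna : ¬((a = 'c' ∧ t.head? = some 'h') ∨ (a = 'l' ∧ t.head? = some 'l') ∨ (a = 'r' ∧ t.head? = some 'r'))) :
    split_groups_in_string_alt_go (a :: t) = String.ofList [a] :: split_groups_in_string_alt_go t := by
  conv_lhs => rw [split_groups_in_string_alt_go.eq_def]
  split
  · rename_i heq; injection heq with h1 h2; subst h1 h2
    exact absurd (Or.inl ⟨rfl, rfl⟩) hna
  · rename_i heq; injection heq with h1 h2; subst h1 h2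
    exact absurd (Or.inr (Or.inl ⟨rfl, rfl⟩)) hna
  · rename_i heq; injection heq with h1 h2; subst h1 h2
    exact absurd (Or.inr (Or.inr ⟨rfl, rfl⟩)) hna
  · rename_i heq; injection heq with h1 h2; subst h1 h2; rfl
  · rename_i heq; cases heq

-- the key invariant: A's loop from index i computes B's scan of the suffix
theorem split_groups_go_eq (s : List Char) (i : Nat) :
    split_groups_in_string_go s i = split_groups_in_string_alt_go (s.drop i) := by
  fun_induction split_groups_in_string_go s i with
  | case1 i h hd ih =>
    have h1 : i + 1 < s.length := by omega
    rw [← List.getElem_cons_drop (h := h), ← List.getElem_cons_drop (h := h1), ih]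
    rw [List.getD_eq_getElem s ' ' h, List.getD_eq_getElem s ' ' h1] at hd
    rcases hd.2 with ⟨ha, hb⟩ | ⟨ha, hb⟩ | ⟨ha, hb⟩ <;>
      simp [ha, hb, split_groups_in_string_alt_go]
  | case2 i h hd ih =>
    rw [← List.getElem_cons_drop (h := h), ih, List.getD_eq_getElem s ' ' h]
    refine (alt_go_cons _ _ ?_).symm
    by_cases h1 : i + 1 < s.length
    · have hh : (s.drop (i + 1)).head? = some s[i+1] := by
        rw [List.head?_drop]
        simp [List.getElem?_eq_getElem h1]
      rw [List.getD_eq_getElem s ' ' h, List.getD_eq_getElem s ' ' h1] at hd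
      rw [hh]
      intro hcon
      exact hd ⟨by omega, by
        rcases hcon with ⟨ha, hb⟩ | ⟨ha, hb⟩ | ⟨ha, hb⟩ <;>
          simp_all⟩
    · have hh : (s.drop (i + 1)).head? = none := by
        simp [List.head?_drop, List.getElem?_eq_none (by omega : s.length ≤ i + 1)]
      rw [hh]; rintro (⟨_, hb⟩ | ⟨_, hb⟩ | ⟨_, hb⟩) <;> cases hb
  | case3 i h =>
    simp [List.drop_eq_nil_of_le (Nat.le_of_not_lt h), split_groups_in_string_alt_go]

-- ===== VERDICT (by name: the statement is the Claim_ definition above) =====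
theorem split_groups_in_string_spec : Claim_equal_split_groups_in_string := by
  intro s _
  unfold Spec_split_groups_in_string split_groups_in_string split_groups_in_string_alt
  simpa using split_groups_go_eq s.toList 0
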